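-- pv_equiv track=rewrite | github.com/martinmateos2001/Guias-de-ejercicios-de-AyED-1-main | Finales/Final 25-07-24/final.py | maximosDeSubsecuencia
-- ===== SOURCE A (Python) =====
-- def maximoValor (seq:'list[int]') -> int:
--     res:int = 0
--     for v in seq:
--         if (v>res):
--             res = v
--     return res
--
-- def subSeqHastaNInclusive(s:'list[int]', n:int) -> 'list[int]':
--     res:'list[int]' = []
--     for i in range(n+1):
--         res.append(s[i])
--     return res
--
-- def maximosDeSubsecuencia(s1:'list[int]', s2:'list[int]') -> 'list[int]':
--     res:'list[int]'=[]
--     for i in range(len(s1)):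
--         e = s1[i]
--         if e > len(s2):
--             res.append(0)
--         else:
--             subseq = subSeqHastaNInclusive(s2, e)
--             res.append(maximoValor(subseq))
--     s1 = res
--     return s1
-- ===== SOURCE B (Python) =====
-- def maximosDeSubsecuencia(s1, s2):
--     # prefix maxima with baseline 0: pm[k] = max(0, s2[0], ..., s2[k-1])
--     pm = [0]
--     for v in s2:
--         pm.append(pm[-1] if pm[-1] >= v else v)
--     return [0 if e < 0 or e > len(s2) else pm[e + 1] for e in s1]
-- ===== Notes on version B (the rewrite author's own statement) =====
-- stated objective: faster
-- what changed: Replaces the per-query rebuild of the prefix s2[0..e] and its rescan by a single precomputed prefix-maxima table (baseline 0) with O(1) lookup per element of s1.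
import Mathlib
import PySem

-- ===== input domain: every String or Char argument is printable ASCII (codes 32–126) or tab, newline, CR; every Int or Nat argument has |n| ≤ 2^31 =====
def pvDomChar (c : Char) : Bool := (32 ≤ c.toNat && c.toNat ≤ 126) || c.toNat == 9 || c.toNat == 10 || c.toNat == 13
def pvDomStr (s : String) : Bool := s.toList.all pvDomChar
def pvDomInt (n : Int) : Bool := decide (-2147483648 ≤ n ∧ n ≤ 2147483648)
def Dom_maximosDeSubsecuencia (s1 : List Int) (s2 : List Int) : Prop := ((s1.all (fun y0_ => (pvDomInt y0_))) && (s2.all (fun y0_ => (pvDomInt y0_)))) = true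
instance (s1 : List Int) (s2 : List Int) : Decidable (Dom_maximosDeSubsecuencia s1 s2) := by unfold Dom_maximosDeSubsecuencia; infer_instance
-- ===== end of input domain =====

-- B replaces A's per-element rebuild-and-rescan of the prefix s2[0..e] by one precomputed
-- prefix-maxima table (baseline 0) looked up per element of s1 (objective: faster).

-- ===== PORT A =====
def maximoValor (seq : List Int) : Int :=
  seq.foldl (fun res v => if v > res then v else res) 0

-- s[i] is in range whenever this is reached under Pre_; pyGetD's default is never used there
def subSeqHastaNInclusive (s : List Int) (n : Int) : List Int :=
  (PySem.List.pyRange 0 (n + 1)).foldl (fun res i => res ++ [PySem.List.pyGetD s i 0]) []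

def maximosDeSubsecuencia (s1 : List Int) (s2 : List Int) : List Int :=
  (PySem.List.pyRange 0 (s1.length : Int)).foldl
    (fun res i =>
      let e := PySem.List.pyGetD s1 i 0
      if e > (s2.length : Int) then res ++ [0]
      else res ++ [maximoValor (subSeqHastaNInclusive s2 e)]) []

-- ===== PORT B =====
-- pm[-1] is Python's negative index on the (always nonempty) accumulator
def prefixMaxTable (s2 : List Int) : List Int :=
  s2.foldl
    (fun pm v =>
      let last := (PySem.List.pyGet? pm (-1)).getD 0
      pm ++ [if last ≥ v then last else v]) [0]

-- pm[e+1] is in range whenever this is reached under Pre_; getD's default is never used there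
def maximosDeSubsecuencia_alt (s1 : List Int) (s2 : List Int) : List Int :=
  let pm := prefixMaxTable s2
  s1.map (fun e => if e < 0 ∨ e > (s2.length : Int) then 0 else (PySem.List.pyGet? pm (e + 1)).getD 0)

-- ===== PRECONDITION & SPEC =====
-- Pre_ excludes exactly the inputs where some element of s1 equals len(s2): there A (and B) raise IndexError.
def Pre_maximosDeSubsecuencia (s1 : List Int) (s2 : List Int) : Prop :=
  ∀ e ∈ s1, e ≠ (s2.length : Int)
instance (s1 : List Int) (s2 : List Int) : Decidable (Pre_maximosDeSubsecuencia s1 s2) := by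
  unfold Pre_maximosDeSubsecuencia; infer_instance

def pvWitness_maximosDeSubsecuencia : List Int × List Int := ([1, 5, -2, 0], [3, 1, 4])

def Spec_maximosDeSubsecuencia (s1 : List Int) (s2 : List Int) (out : List Int) : Prop := out = maximosDeSubsecuencia_alt s1 s2
instance (s1 : List Int) (s2 : List Int) (out : List Int) : Decidable (Spec_maximosDeSubsecuencia s1 s2 out) := by unfold Spec_maximosDeSubsecuencia; infer_instance

-- ===== CLAIM (what is proved, stated in full; the proofs are below) =====
def Claim_equal_maximosDeSubsecuencia : Prop := ∀ (s1 : List Int) (s2 : List Int), Dom_maximosDeSubsecuencia s1 s2 → Pre_maximosDeSubsecuencia s1 s2 → Spec_maximosDeSubsecuencia s1 s2 (maximosDeSubsecuencia s1 s2)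

-- ===== LEMMAS AND PROOFS =====

-- the initial prefix of length m, read index by index, is List.take m
lemma map_range_pyGetD_take (s2 : List Int) (m : Nat) (h : m ≤ s2.length) :
    (List.range m).map (fun (k : Nat) => PySem.List.pyGetD s2 (k : Int) 0) = s2.take m := by
  induction m with
  | zero => simp
  | succ m ih =>
    have hm : m < s2.length := by omega
    rw [List.range_succ, List.map_append, ih (by omega), List.take_add_one]
    simp [PySem.List.pyGetD_natCast, List.getD, List.getElem?_eq_getElem hm]

-- step-by-step form of maximoValor on a snoc
lemma maximoValor_snoc (s : List Int) (v : Int) :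
    maximoValor (s ++ [v]) = if maximoValor s ≥ v then maximoValor s else v := by
  unfold maximoValor
  rw [List.foldl_append]
  simp only [List.foldl]
  split_ifs <;> omega

-- B's table is exactly the list of prefix maxima of s2 (baseline 0)
lemma prefixMaxTable_eq (s2 : List Int) :
    prefixMaxTable s2 = (List.range (s2.length + 1)).map (fun k => maximoValor (s2.take k)) := by
  induction s2 using List.reverseRecOn with
  | nil => simp [prefixMaxTable, maximoValor]
  | append_singleton s2 v ih =>
    unfold prefixMaxTable at ih ⊢
    rw [List.foldl_append, ih]
    simp only [List.foldl]
    have hne : ((List.range (s2.length + 1)).map (fun k => maximoValor (s2.take k))) ≠ [] := by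
      simp [List.range_succ]
    rw [PySem.List.pyGet?_neg_one]
    have hlast : ((List.range (s2.length + 1)).map (fun k => maximoValor (s2.take k))).getLast?
        = some (maximoValor s2) := by
      rw [List.getLast?_eq_getElem?]
      simp
    rw [hlast, Option.getD_some]
    have hlen : (s2 ++ [v]).length + 1 = (s2.length + 1) + 1 := by simp
    rw [hlen]
    conv_rhs => rw [List.range_succ, List.map_append]
    have hleft : (List.range (s2.length + 1)).map (fun k => maximoValor ((s2 ++ [v]).take k))
        = (List.range (s2.length + 1)).map (fun k => maximoValor (s2.take k)) := by
      apply List.map_congr_left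
      intro k hk
      rw [List.mem_range] at hk
      rw [List.take_append_of_le_length (by omega)]
    rw [hleft]
    congr 1
    simp only [List.map_cons, List.map_nil]
    rw [List.take_of_length_le (by simp), maximoValor_snoc]

-- the value A computes for one element e of s1, in closed form
lemma entryA_eq (s2 : List Int) (e : Int) (hne : e ≠ (s2.length : Int)) :
    (if e > (s2.length : Int) then (0 : Int) else maximoValor (subSeqHastaNInclusive s2 e))
      = (if e < 0 ∨ e > (s2.length : Int) then 0
         else (PySem.List.pyGet? (prefixMaxTable s2) (e + 1)).getD 0) := by
  by_cases hgt : e > (s2.length : Int)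
  · simp [hgt]
  · rw [if_neg hgt]
    by_cases hneg : e < 0
    · rw [if_pos (Or.inl hneg)]
      unfold subSeqHastaNInclusive
      rw [PySem.List.pyRange_one_eq_nil (by omega)]
      simp [maximoValor]
    · rw [if_neg (by tauto)]
      have hlt : e < (s2.length : Int) := by omega
      have h0 : 0 ≤ e := by omega
      -- A's subsequence is take (e+1) of s2
      have hsub : subSeqHastaNInclusive s2 e = s2.take (e.toNat + 1) := by
        unfold subSeqHastaNInclusive
        rw [PySem.List.foldl_append_singleton_eq_map, List.nil_append,
            PySem.List.pyRange_zero, List.map_map]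
        have h1 : (e + 1).toNat = e.toNat + 1 := by omega
        rw [h1]
        have := map_range_pyGetD_take s2 (e.toNat + 1) (by omega)
        simpa [Function.comp_def] using this
      -- B's lookup reads the same prefix maximum from the table
      rw [hsub, prefixMaxTable_eq, PySem.List.pyGet?_of_nonneg _ (by omega)]
      have hidx : (e + 1).toNat < ((List.range (s2.length + 1)).map
          (fun k => maximoValor (s2.take k))).length := by
        simp; omega
      rw [List.getElem?_eq_getElem hidx]
      simp only [Option.getD_some, List.getElem_map, List.getElem_range]
      congr 2
      omega

-- ===== VERDICT (by name: the statement is the Claim_ definition above) =====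
theorem maximosDeSubsecuencia_spec : Claim_equal_maximosDeSubsecuencia := by
  intro s1 s2 _ hpre
  unfold Spec_maximosDeSubsecuencia maximosDeSubsecuencia maximosDeSubsecuencia_alt
  rw [PySem.List.foldl_pyRange_zero_pyGetD' s1 0
        (fun res e => if e > (s2.length : Int) then res ++ [0]
                      else res ++ [maximoValor (subSeqHastaNInclusive s2 e)]) []]
  have hfun : (fun (res : List Int) (e : Int) =>
      if e > (s2.length : Int) then res ++ [0]
      else res ++ [maximoValor (subSeqHastaNInclusive s2 e)]) =
      (fun res e => res ++ [if e > (s2.length : Int) then 0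
        else maximoValor (subSeqHastaNInclusive s2 e)]) := by
    funext res e; split <;> rfl
  rw [hfun, PySem.List.foldl_append_singleton_eq_map, List.nil_append]
  apply List.map_congr_left
  intro e he
  exact entryA_eq s2 e (hpre e he)
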